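-- pv_equiv track=rewrite | github.com/PunithaYaku/Chess-Puzzel-Gen | app.py | repair_fen
-- ===== SOURCE A (Python) =====
-- def repair_fen(fen):
--     """
--     Basic FEN repair logic to ensure the generated string is a valid board state.
--     Ensures 8 rows and 8 squares per row, then appends default game state values.
--     """
--     parts = fen.split(" ")
--     pos = parts[0]
--     rows = pos.split("/")
--
--     # Ensure exactly 8 rows
--     if len(rows) > 8:
--         rows = rows[:8]
--     elif len(rows) < 8:
--         rows.extend(['8'] * (8 - len(rows)))
--
--     new_rows = []
--     for row in rows:
--         squares = []
--         for char in row: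
--             if char.isdigit():
--                 squares.extend(['1'] * int(char))
--             else:
--                 squares.append(char)
--
--         # Ensure exactly 8 squares per row
--         if len(squares) > 8:
--             squares = squares[:8]
--         elif len(squares) < 8:
--             squares.extend(['1'] * (8 - len(squares)))
--
--         # Convert back to shorthand (e.g., 111 -> 3)
--         new_row = ""
--         count = 0
--         for s in squares:
--             if s == '1':
--                 count += 1
--             else:
--                 if count > 0:
--                     new_row += str(count)
--                     count = 0
--                 new_row += s
--         if count > 0:
--             new_row += str(count)
--         new_rows.append(new_row)
--
--     new_pos = "/".join(new_rows)
--     turn = parts[1] if len(parts) > 1 and parts[1] in ['w', 'b'] else 'w'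
--     castling = parts[2] if len(parts) > 2 else '-'
--     ep = parts[3] if len(parts) > 3 else '-'
--     return f"{new_pos} {turn} {castling} {ep} 0 1"
-- ===== SOURCE B (Python) =====
-- def _repair_row(row):
--     # One pass: `count` = pending empty squares, `total` = squares emitted so far.
--     new_row = ""
--     count = 0
--     total = 0
--     for ch in row:
--         if ch.isdigit():
--             add = min(int(ch), 8 - total)
--             count += add
--             total += add
--         elif total < 8:
--             if count > 0:
--                 new_row += str(count)
--                 count = 0
--             new_row += ch
--             total += 1
--         # pieces beyond the 8th square are dropped
--     if total < 8:
--         count += 8 - total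
--     if count > 0:
--         new_row += str(count)
--     return new_row
--
--
-- def repair_fen(fen):
--     parts = fen.split(" ")
--     rows = (parts[0].split("/") + ["8"] * 8)[:8]
--     new_pos = "/".join(_repair_row(row) for row in rows)
--     turn = parts[1] if len(parts) > 1 and parts[1] in ["w", "b"] else "w"
--     castling = parts[2] if len(parts) > 2 else "-"
--     ep = parts[3] if len(parts) > 3 else "-"
--     return f"{new_pos} {turn} {castling} {ep} 0 1"
-- ===== Notes on version B (the rewrite author's own statement) =====
-- stated objective: alternative
-- what changed: Each row is repaired in a single pass tracking pending-empty and emitted-square counters, instead of A's three passes (expand digits to a square list, pad/truncate it to 8, recompress runs of empties); row padding/truncation becomes a uniform pad-then-slice.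
import Mathlib
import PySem

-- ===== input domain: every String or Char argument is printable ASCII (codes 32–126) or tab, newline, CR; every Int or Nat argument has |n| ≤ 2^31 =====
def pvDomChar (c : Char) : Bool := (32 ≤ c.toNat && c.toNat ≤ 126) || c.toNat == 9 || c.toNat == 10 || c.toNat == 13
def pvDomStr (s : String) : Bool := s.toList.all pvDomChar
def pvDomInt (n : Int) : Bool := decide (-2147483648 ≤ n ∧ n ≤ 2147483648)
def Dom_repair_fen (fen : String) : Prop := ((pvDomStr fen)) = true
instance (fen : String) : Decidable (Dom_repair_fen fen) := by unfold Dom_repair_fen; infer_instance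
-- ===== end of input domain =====

-- B repairs each FEN row in a single counter-tracking pass instead of A's expand/pad/recompress
-- three passes (objective: alternative decomposition, same cost).

-- ===== PORT A =====
-- one step of A's "for char in row" expansion loop
def pvStepA (squares : List Char) (c : Char) : List Char :=
  if PySem.Chars.strIsdigit [c] then
    -- int(char): guarded by isdigit, so on the ASCII domain ofChars? is `some` and nonnegative
    squares ++ List.replicate ((PySem.Int.ofChars? [c]).getD 0).toNat '1'
  else squares ++ [c]

def pvSquaresA (row : List Char) : List Char := row.foldl pvStepA []

-- A's "ensure exactly 8 squares per row" branch
def pvPad8 (squares : List Char) : List Char :=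
  if squares.length > 8 then squares.take 8
  else if squares.length < 8 then squares ++ List.replicate (8 - squares.length) '1'
  else squares

-- one step of A's "for s in squares" recompression loop (state: new_row, count)
def pvCompressStep (acc : List Char × Nat) (s : Char) : List Char × Nat :=
  if s = '1' then (acc.1, acc.2 + 1)
  else ((if acc.2 > 0 then acc.1 ++ PySem.Int.toChars (acc.2 : Int) else acc.1) ++ [s], 0)

def pvCompressA (squares : List Char) : List Char :=
  let st := squares.foldl pvCompressStep ([], 0)
  if st.2 > 0 then st.1 ++ PySem.Int.toChars (st.2 : Int) else st.1

def repair_fen (fen : String) : String :=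
  let parts := PySem.Chars.splitOn fen.toList [' ']
  let pos := parts.headD []          -- parts[0]; split always returns a nonempty list
  let rows := PySem.Chars.splitOn pos ['/']
  let rows :=
    if rows.length > 8 then rows.take 8     -- rows[:8] (nonnegative bound)
    else if rows.length < 8 then rows ++ List.replicate (8 - rows.length) ['8']
    else rows
  let newRows := rows.foldl (fun acc row => acc ++ [pvCompressA (pvPad8 (pvSquaresA row))]) []
  let newPos := PySem.Chars.join ['/'] newRows
  let turn := if parts.length > 1 ∧ (parts.getD 1 [] = ['w'] ∨ parts.getD 1 [] = ['b'])
              then parts.getD 1 [] else ['w']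
  let castling := if parts.length > 2 then parts.getD 2 [] else ['-']
  let ep := if parts.length > 3 then parts.getD 3 [] else ['-']
  String.ofList (newPos ++ [' '] ++ turn ++ [' '] ++ castling ++ [' '] ++ ep ++ (" 0 1").toList)

-- ===== PORT B =====
-- one step of B's single row pass (state: new_row, count, total)
def pvRowStepB (acc : List Char × Nat × Nat) (ch : Char) : List Char × Nat × Nat :=
  if PySem.Chars.strIsdigit [ch] then
    let add := min ((PySem.Int.ofChars? [ch]).getD 0).toNat (8 - acc.2.2)
    (acc.1, acc.2.1 + add, acc.2.2 + add)
  else if acc.2.2 < 8 then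
    ((if acc.2.1 > 0 then acc.1 ++ PySem.Int.toChars (acc.2.1 : Int) else acc.1) ++ [ch],
     0, acc.2.2 + 1)
  else acc                            -- pieces beyond the 8th square are dropped

def pvRepairRowB (row : List Char) : List Char :=
  let st := row.foldl pvRowStepB ([], 0, 0)
  let count := if st.2.2 < 8 then st.2.1 + (8 - st.2.2) else st.2.1
  if count > 0 then st.1 ++ PySem.Int.toChars (count : Int) else st.1

def repair_fen_alt (fen : String) : String :=
  let parts := PySem.Chars.splitOn fen.toList [' ']
  let rows := (PySem.Chars.splitOn (parts.headD []) ['/'] ++ List.replicate 8 ['8']).take 8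
  let newPos := PySem.Chars.join ['/'] (rows.map pvRepairRowB)
  let turn := if parts.length > 1 ∧ (parts.getD 1 [] = ['w'] ∨ parts.getD 1 [] = ['b'])
              then parts.getD 1 [] else ['w']
  let castling := if parts.length > 2 then parts.getD 2 [] else ['-']
  let ep := if parts.length > 3 then parts.getD 3 [] else ['-']
  String.ofList (newPos ++ [' '] ++ turn ++ [' '] ++ castling ++ [' '] ++ ep ++ (" 0 1").toList)

-- ===== PRECONDITION & SPEC =====
def Spec_repair_fen (fen : String) (out : String) : Prop := out = repair_fen_alt fen
instance (fen : String) (out : String) : Decidable (Spec_repair_fen fen out) := by unfold Spec_repair_fen; infer_instance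

-- ===== CLAIM (what is proved, stated in full; the proofs are below) =====
def Claim_equal_repair_fen : Prop := ∀ (fen : String), Dom_repair_fen fen → Spec_repair_fen fen (repair_fen fen)

-- ===== LEMMAS AND PROOFS =====

-- B's loop state corresponding to A's square list S
def pvInv (S : List Char) : List Char × Nat × Nat :=
  (((S.take 8).foldl pvCompressStep ([], 0)).1,
   ((S.take 8).foldl pvCompressStep ([], 0)).2, min S.length 8)

theorem pvCompress_ones (k : Nat) : ∀ (acc : List Char × Nat),
    (List.replicate k '1').foldl pvCompressStep acc = (acc.1, acc.2 + k) := by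
  induction k with
  | zero => intro acc; simp
  | succ n ih =>
      intro acc
      simp [List.replicate_succ, pvCompressStep, ih]
      omega

theorem pvPad8_eq (S : List Char) :
    pvPad8 S = S.take 8 ++ List.replicate (8 - S.length) '1' := by
  unfold pvPad8
  split_ifs with h1 h2
  · have : 8 - S.length = 0 := by omega
    simp [this]
  · rw [List.take_of_length_le (by omega)]
  · have hlen : S.length = 8 := by omega
    rw [List.take_of_length_le (by omega)]
    simp [hlen]

theorem pvStep_inv (S : List Char) (c : Char) :
    pvRowStepB (pvInv S) c = pvInv (pvStepA S c) := by
  unfold pvRowStepB pvStepA pvInv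
  by_cases hd : PySem.Chars.strIsdigit [c] = true
  · simp only [hd, if_true]
    set n := ((PySem.Int.ofChars? [c]).getD 0).toNat with hn
    have htake : (S ++ List.replicate n '1').take 8
        = S.take 8 ++ List.replicate (min (8 - S.length) n) '1' := by
      rw [List.take_append, List.take_replicate]
    rw [htake, List.foldl_append, pvCompress_ones]
    have h1 : min n (8 - min S.length 8) = min (8 - S.length) n := by omega
    have h2 : min (S ++ List.replicate n '1').length 8
        = min S.length 8 + min n (8 - min S.length 8) := by
      simp [List.length_append]; omega
    rw [h2, h1]
  · have hc1 : c ≠ '1' := by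
      intro h; subst h; exact hd (by decide)
    rw [Bool.not_eq_true] at hd
    simp only [hd, Bool.false_eq_true, if_false]
    by_cases ht : min S.length 8 < 8
    · have hlt : S.length < 8 := by omega
      rw [if_pos ht]
      have htake : (S ++ [c]).take 8 = S.take 8 ++ [c] := by
        rw [List.take_of_length_le (by simp; omega), List.take_of_length_le (by omega)]
      rw [htake, List.foldl_append]
      simp only [List.foldl, pvCompressStep, if_neg hc1]
      have : min (S ++ [c]).length 8 = min S.length 8 + 1 := by simp; omega
      rw [this]
    · have hge : 8 ≤ S.length := by omega
      rw [if_neg ht]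
      have htake : (S ++ [c]).take 8 = S.take 8 := by
        rw [List.take_append]
        have : 8 - S.length = 0 := by omega
        simp [this]
      rw [htake]
      have : min (S ++ [c]).length 8 = min S.length 8 := by simp; omega
      rw [this]

theorem pvKey (row : List Char) : ∀ (S : List Char),
    row.foldl pvRowStepB (pvInv S) = pvInv (row.foldl pvStepA S) := by
  induction row with
  | nil => intro S; rfl
  | cons c rest ih =>
      intro S
      simp only [List.foldl, pvStep_inv, ih]

theorem pvRow_eq (row : List Char) :
    pvRepairRowB row = pvCompressA (pvPad8 (pvSquaresA row)) := by
  have h0 : ([], 0, 0) = pvInv [] := by rfl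
  unfold pvRepairRowB
  rw [h0, pvKey row [], pvPad8_eq]
  unfold pvCompressA pvSquaresA pvInv
  rw [List.foldl_append, pvCompress_ones]
  set p := ((List.foldl pvStepA [] row).take 8).foldl pvCompressStep ([], 0) with hp
  set L := (List.foldl pvStepA [] row).length with hL
  have hcnt : (if min L 8 < 8 then p.2 + (8 - min L 8) else p.2) = p.2 + (8 - L) := by
    by_cases h : L < 8
    · simp only [if_pos (by omega : min L 8 < 8)]; omega
    · simp only [if_neg (by omega : ¬ min L 8 < 8)]; omega
  simp only [hcnt]

theorem pvRows_eq (rs : List (List Char)) :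
    (if rs.length > 8 then rs.take 8
     else if rs.length < 8 then rs ++ List.replicate (8 - rs.length) ['8']
     else rs)
    = (rs ++ List.replicate 8 (['8'] : List Char)).take 8 := by
  rw [List.take_append, List.take_replicate]
  have hm : min (8 - rs.length) 8 = 8 - rs.length := by omega
  rw [hm]
  split_ifs with h1 h2
  · have : 8 - rs.length = 0 := by omega
    simp [this]
  · rw [List.take_of_length_le (by omega)]
  · have hlen : rs.length = 8 := by omega
    rw [List.take_of_length_le (by omega)]
    simp [hlen]

-- ===== VERDICT (by name: the statement is the Claim_ definition above) =====
theorem repair_fen_spec : Claim_equal_repair_fen := by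
  intro fen _
  unfold Spec_repair_fen repair_fen repair_fen_alt
  simp only [PySem.List.foldl_append_singleton_eq_map, List.nil_append, pvRows_eq]
  have hmap : ∀ rs : List (List Char),
      rs.map (fun row => pvCompressA (pvPad8 (pvSquaresA row))) = rs.map pvRepairRowB :=
    fun rs => List.map_congr_left (fun row _ => (pvRow_eq row).symm)
  rw [hmap]
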